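-- pv_equiv track=rewrite | github.com/SDragon42/AdventOfCode | 2020-py/day-14.py | flip_address_bits
-- ===== SOURCE A (Python) =====
-- from typing import List, Dict
--
-- def flip_address_bits(bValue: List[str], replacements: str) -> List[str]:
--     i = 0
--     while i < len(bValue):
--         if bValue[i] == "X":
--             bValue[i] = replacements[0]
--             replacements = replacements[1:]
--         i += 1
--     return bValue
-- ===== SOURCE B (Python) =====
-- def flip_address_bits(bValue, replacements):
--     xs = [i for i, c in enumerate(bValue) if c == "X"]
--     for j, i in enumerate(xs):
--         bValue[i] = replacements[j]
--     return bValue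
-- ===== Notes on version B (the rewrite author's own statement) =====
-- stated objective: alternative
-- what changed: B first collects the indices of all 'X' entries in one pass, then fills them with successive replacement characters in a second pass, instead of A's single scan that repeatedly slices the replacements string.
import Mathlib
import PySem

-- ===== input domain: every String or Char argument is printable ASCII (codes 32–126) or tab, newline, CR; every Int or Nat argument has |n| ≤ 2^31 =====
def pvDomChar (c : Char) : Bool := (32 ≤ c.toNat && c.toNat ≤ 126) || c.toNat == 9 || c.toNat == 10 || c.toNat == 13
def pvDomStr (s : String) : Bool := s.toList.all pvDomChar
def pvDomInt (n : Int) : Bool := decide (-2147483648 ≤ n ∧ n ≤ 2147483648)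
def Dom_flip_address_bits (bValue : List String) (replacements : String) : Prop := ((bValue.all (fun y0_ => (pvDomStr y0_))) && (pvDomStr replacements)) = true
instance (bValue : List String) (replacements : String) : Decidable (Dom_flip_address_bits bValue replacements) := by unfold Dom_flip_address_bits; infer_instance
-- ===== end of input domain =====

-- B replaces A's one-pass scan-and-slice by an index-collection pass followed by a fill pass
-- (alternative decomposition, not faster); both mutate bValue in place identically, and the
-- equivalence proved here is about the returned list.

-- ===== PORT A =====
-- A walks the list once; at each "X" it consumes the head of `replacements` (replacements[0],
-- then replacements = replacements[1:]). If replacements is empty there Python raises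
-- IndexError (excluded by Pre_); the port returns the rest unmodified in that branch.
def flipGoA : List String → List Char → List String
  | [], _ => []
  | s :: rest, reps =>
    if s = "X" then
      match reps with
      | [] => s :: rest        -- Python: IndexError (outside Pre_)
      | c :: cs => String.mk [c] :: flipGoA rest cs
    else s :: flipGoA rest reps

def flip_address_bits (bValue : List String) (replacements : String) : List String :=
  flipGoA bValue replacements.toList

-- ===== PORT B =====
-- xs = [i for i, c in enumerate(bValue) if c == "X"]
def xIndices : List String → Nat → List Nat
  | [], _ => []
  | s :: rest, i => if s = "X" then i :: xIndices rest (i + 1) else xIndices rest (i + 1)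

-- for j, i in enumerate(xs): bValue[i] = replacements[j]
def fillGo : List String → List Nat → List Char → List String
  | acc, [], _ => acc
  | acc, _ :: _, [] => acc     -- Python: IndexError at replacements[j] (outside Pre_)
  | acc, i :: xs, c :: cs => fillGo (acc.set i (String.mk [c])) xs cs

def flip_address_bits_alt (bValue : List String) (replacements : String) : List String :=
  fillGo bValue (xIndices bValue 0) replacements.toList

-- ===== PRECONDITION & SPEC =====
-- Pre_ excludes exactly the inputs where Python A raises IndexError: more "X" entries than
-- replacement characters.
def Pre_flip_address_bits (bValue : List String) (replacements : String) : Prop :=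
  bValue.count "X" ≤ replacements.toList.length
instance (bValue : List String) (replacements : String) : Decidable (Pre_flip_address_bits bValue replacements) := by unfold Pre_flip_address_bits; infer_instance

def pvWitness_flip_address_bits : List String × String := (["X", "0", "X"], "10")

def Spec_flip_address_bits (bValue : List String) (replacements : String) (out : List String) : Prop := out = flip_address_bits_alt bValue replacements
instance (bValue : List String) (replacements : String) (out : List String) : Decidable (Spec_flip_address_bits bValue replacements out) := by unfold Spec_flip_address_bits; infer_instance

-- ===== CLAIM (what is proved, stated in full; the proofs are below) =====
def Claim_equal_flip_address_bits : Prop := ∀ (bValue : List String) (replacements : String), Dom_flip_address_bits bValue replacements → Pre_flip_address_bits bValue replacements → Spec_flip_address_bits bValue replacements (flip_address_bits bValue replacements)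

-- ===== LEMMAS AND PROOFS =====

-- shifting the start index shifts every collected index
theorem xIndices_shift (l : List String) (n : Nat) :
    xIndices l (n + 1) = (xIndices l n).map (· + 1) := by
  induction l generalizing n with
  | nil => simp [xIndices]
  | cons s rest ih =>
    by_cases hs : s = "X" <;> simp [xIndices, hs, ih]

-- filling shifted indices inside a cons skips the head
theorem fillGo_cons (s : String) (xs : List Nat) (acc : List String) (reps : List Char) :
    fillGo (s :: acc) (xs.map (· + 1)) reps = s :: fillGo acc xs reps := by
  induction xs generalizing acc reps with
  | nil => simp [fillGo]
  | cons i xs' ih =>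
    cases reps with
    | nil => simp [fillGo]
    | cons c cs => simp [fillGo, List.set, ih]

theorem flip_eq (bValue : List String) (reps : List Char)
    (h : bValue.count "X" ≤ reps.length) :
    flipGoA bValue reps = fillGo bValue (xIndices bValue 0) reps := by
  induction bValue generalizing reps with
  | nil => simp [flipGoA, xIndices, fillGo]
  | cons s rest ih =>
    by_cases hs : s = "X"
    · subst hs
      cases reps with
      | nil => simp [List.count_cons] at h
      | cons c cs =>
        have h' : rest.count "X" ≤ cs.length := by
          simp at h; omega
        simp [flipGoA, xIndices, fillGo, xIndices_shift rest 0,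
          fillGo_cons, ih cs h']
    · have h' : rest.count "X" ≤ reps.length := by
        simp [hs] at h; omega
      simp [flipGoA, xIndices, hs, xIndices_shift rest 0, fillGo_cons, ih reps h']

-- ===== VERDICT (by name: the statement is the Claim_ definition above) =====
theorem flip_address_bits_spec : Claim_equal_flip_address_bits := by
  intro bValue replacements _ hpre
  unfold Spec_flip_address_bits flip_address_bits flip_address_bits_alt
  exact flip_eq bValue replacements.toList hpre
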